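-- pv_equiv track=rewrite | github.com/kulikr/thesisProject | Evaluation.py | getLengthDist
-- ===== SOURCE A (Python) =====
-- def getLengthDist(usersSessions):
--     dictLength = {}
--     for i in range(300):
--         dictLength[str(i)] = 0
--     for list in usersSessions:
--         for session in list:
--             dictLength[str(len(session))]+=1
--     return dictLength
-- ===== SOURCE B (Python) =====
-- def getLengthDist(usersSessions):
--     # Per-bucket counting: for each of the 300 possible lengths, count the
--     # sessions of exactly that length (no dict increments at all).
--     sessions = [s for lst in usersSessions for s in lst]
--     return {str(i): sum(len(s) == i for s in sessions) for i in range(300)}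
-- ===== Notes on version B (the rewrite author's own statement) =====
-- stated objective: alternative
-- what changed: Instead of mutating a pre-zeroed 300-key dict with one increment per session inside nested loops, B builds the result in a single dict comprehension that, for each of the 300 bucket lengths, counts the sessions of exactly that length by a scan; there is no increment/update of any dict entry.
import Mathlib
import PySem

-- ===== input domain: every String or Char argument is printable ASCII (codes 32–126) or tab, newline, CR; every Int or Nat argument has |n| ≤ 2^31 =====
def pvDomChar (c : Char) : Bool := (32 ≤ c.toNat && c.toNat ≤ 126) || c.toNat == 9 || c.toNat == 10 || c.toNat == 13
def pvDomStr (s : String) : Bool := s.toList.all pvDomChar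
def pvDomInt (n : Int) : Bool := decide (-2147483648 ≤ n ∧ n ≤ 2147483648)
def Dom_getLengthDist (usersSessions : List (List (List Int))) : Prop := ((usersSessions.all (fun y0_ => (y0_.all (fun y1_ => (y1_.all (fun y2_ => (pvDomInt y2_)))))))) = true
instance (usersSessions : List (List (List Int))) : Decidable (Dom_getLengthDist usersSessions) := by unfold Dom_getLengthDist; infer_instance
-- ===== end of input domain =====

-- B replaces A's per-session dict increments by per-bucket counting: one scan per bucket
-- length, no dict mutation (objective: alternative algorithm, similar cost here).

-- ===== PORT A =====
-- dictLength[k] += 1 : lookup (none = KeyError, excluded by Pre_) then store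
def pvIncA (d : PySem.Dict String Int) (k : String) : PySem.Dict String Int :=
  match d.get? k with
  | some v => d.insert k (v + 1)
  | none => d  -- Python raises KeyError here; Pre_getLengthDist excludes such inputs

def getLengthDist (usersSessions : List (List (List Int))) : List (String × Int) :=
  let dictLength : PySem.Dict String Int :=
    (PySem.List.pyRange 0 300 1).foldl (fun d i => d.insert (PySem.Int.toStr i) 0) PySem.Dict.empty
  let dictLength :=
    usersSessions.foldl
      (fun d lst => lst.foldl (fun d session => pvIncA d (PySem.Int.toStr (session.length : Int))) d)
      dictLength
  dictLength.items

-- ===== PORT B =====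
def getLengthDist_alt (usersSessions : List (List (List Int))) : List (String × Int) :=
  let sessions : List (List Int) := usersSessions.flatMap (fun lst => lst)
  -- dict comprehension over the distinct keys str(0)..str(299): its items in
  -- insertion order are exactly this map (exact because the keys are distinct);
  -- sum(len(s) == i for s in sessions) sums the 0/1 indicators.
  (PySem.List.pyRange 0 300 1).map (fun i =>
    (PySem.Int.toStr i,
      (sessions.map (fun s => if (s.length : Int) = i then (1 : Int) else 0)).sum))

-- ===== PRECONDITION & SPEC =====
-- Pre_ excludes inputs containing a session of length ≥ 300: there Python A raises KeyError.
def Pre_getLengthDist (usersSessions : List (List (List Int))) : Prop :=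
  (usersSessions.all (fun lst => lst.all (fun s => s.length < 300))) = true
instance (usersSessions : List (List (List Int))) : Decidable (Pre_getLengthDist usersSessions) := by unfold Pre_getLengthDist; infer_instance

def pvWitness_getLengthDist : List (List (List Int)) := [[[1], [1, 2]], [[3]]]

def Spec_getLengthDist (usersSessions : List (List (List Int))) (out : List (String × Int)) : Prop := out = getLengthDist_alt usersSessions
instance (usersSessions : List (List (List Int))) (out : List (String × Int)) : Decidable (Spec_getLengthDist usersSessions out) := by unfold Spec_getLengthDist; infer_instance

-- ===== CLAIM (what is proved, stated in full; the proofs are below) =====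
def Claim_equal_getLengthDist : Prop := ∀ (usersSessions : List (List (List Int))), Dom_getLengthDist usersSessions → Pre_getLengthDist usersSessions → Spec_getLengthDist usersSessions (getLengthDist usersSessions)

-- ===== LEMMAS AND PROOFS =====

-- ---- str(n) is injective on 0 ≤ n < 1000 ----

theorem pv_toDigitsCore_lt (fuel n : Nat) (ds : List Char) (hf : 0 < fuel) (h : n < 10) :
    Nat.toDigitsCore 10 fuel n ds = Nat.digitChar n :: ds := by
  cases fuel with
  | zero => omega
  | succ f =>
    simp only [Nat.toDigitsCore]
    have h1 : n / 10 = 0 := Nat.div_eq_of_lt h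
    have h2 : n % 10 = n := Nat.mod_eq_of_lt h
    simp [h1, h2]

theorem pv_toDigitsCore_lt2 (fuel n : Nat) (ds : List Char) (hf : 1 < fuel)
    (h1 : 10 ≤ n) (h2 : n < 100) :
    Nat.toDigitsCore 10 fuel n ds = Nat.digitChar (n / 10) :: Nat.digitChar (n % 10) :: ds := by
  cases fuel with
  | zero => omega
  | succ f =>
    simp only [Nat.toDigitsCore]
    have hd : n / 10 ≠ 0 := by omega
    simp only [hd, if_false]
    exact pv_toDigitsCore_lt f (n / 10) _ (by omega) (by omega)

theorem pv_toDigitsCore_lt3 (fuel n : Nat) (ds : List Char) (hf : 2 < fuel)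
    (h1 : 100 ≤ n) (h2 : n < 1000) :
    Nat.toDigitsCore 10 fuel n ds =
      Nat.digitChar (n / 100) :: Nat.digitChar (n / 10 % 10) :: Nat.digitChar (n % 10) :: ds := by
  cases fuel with
  | zero => omega
  | succ f =>
    simp only [Nat.toDigitsCore]
    have hd : n / 10 ≠ 0 := by omega
    simp only [hd, if_false]
    have := pv_toDigitsCore_lt2 f (n / 10) (Nat.digitChar (n % 10) :: ds) (by omega) (by omega) (by omega)
    rw [this, Nat.div_div_eq_div_mul]

theorem pv_digitChar_inj (a b : Nat) (ha : a < 10) (hb : b < 10)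
    (h : Nat.digitChar a = Nat.digitChar b) : a = b := by
  interval_cases a <;> interval_cases b <;> simp_all [Nat.digitChar]

theorem pv_toDigits_inj (m n : Nat) (hm : m < 1000) (hn : n < 1000)
    (h : Nat.toDigits 10 m = Nat.toDigits 10 n) : m = n := by
  unfold Nat.toDigits at h
  rcases Nat.lt_or_ge m 10 with h1 | h1
  · rw [pv_toDigitsCore_lt _ _ _ (by omega) h1] at h
    rcases Nat.lt_or_ge n 10 with h2 | h2
    · rw [pv_toDigitsCore_lt _ _ _ (by omega) h2] at h
      simp only [List.cons.injEq] at h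
      exact pv_digitChar_inj _ _ h1 h2 h.1
    · rcases Nat.lt_or_ge n 100 with h3 | h3
      · rw [pv_toDigitsCore_lt2 _ _ _ (by omega) h2 h3] at h; simp at h
      · rw [pv_toDigitsCore_lt3 _ _ _ (by omega) h3 hn] at h; simp at h
  · rcases Nat.lt_or_ge m 100 with h2 | h2
    · rw [pv_toDigitsCore_lt2 _ _ _ (by omega) h1 h2] at h
      rcases Nat.lt_or_ge n 10 with h3 | h3
      · rw [pv_toDigitsCore_lt _ _ _ (by omega) h3] at h; simp at h
      · rcases Nat.lt_or_ge n 100 with h4 | h4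
        · rw [pv_toDigitsCore_lt2 _ _ _ (by omega) h3 h4] at h
          simp only [List.cons.injEq, and_true] at h
          have e1 := pv_digitChar_inj _ _ (by omega) (by omega) h.1
          have e2 := pv_digitChar_inj _ _ (by omega) (by omega) h.2
          omega
        · rw [pv_toDigitsCore_lt3 _ _ _ (by omega) h4 hn] at h; simp at h
    · rw [pv_toDigitsCore_lt3 _ _ _ (by omega) h2 hm] at h
      rcases Nat.lt_or_ge n 10 with h3 | h3
      · rw [pv_toDigitsCore_lt _ _ _ (by omega) h3] at h; simp at h
      · rcases Nat.lt_or_ge n 100 with h4 | h4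
        · rw [pv_toDigitsCore_lt2 _ _ _ (by omega) h3 h4] at h; simp at h
        · rw [pv_toDigitsCore_lt3 _ _ _ (by omega) h4 hn] at h
          simp only [List.cons.injEq, and_true] at h
          have e1 := pv_digitChar_inj _ _ (by omega) (by omega) h.1
          have e2 := pv_digitChar_inj _ _ (by omega) (by omega) h.2.1
          have e3 := pv_digitChar_inj _ _ (by omega) (by omega) h.2.2
          omega

theorem pv_toStr_inj (i j : Int) (hi0 : 0 ≤ i) (hi : i < 1000) (hj0 : 0 ≤ j) (hj : j < 1000)
    (h : PySem.Int.toStr i = PySem.Int.toStr j) : i = j := by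
  have h' : PySem.Int.toChars i = PySem.Int.toChars j := by
    rw [← PySem.Int.toList_toStr, ← PySem.Int.toList_toStr, h]
  unfold PySem.Int.toChars at h'
  rw [if_neg (by omega), if_neg (by omega)] at h'
  have := pv_toDigits_inj i.toNat j.toNat (by omega) (by omega) h'
  omega

-- ---- basic dict facts ----

theorem pv_contains_iff_mem_keys {κ ν : Type} [BEq κ] [LawfulBEq κ]
    (d : PySem.Dict κ ν) (k : κ) : d.contains k = true ↔ k ∈ d.keys := by
  simp [PySem.Dict.contains, PySem.Dict.keys, List.any_eq_true, List.mem_map]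

theorem pv_set_update_of_subset {α : Type} [BEq α] [LawfulBEq α]
    (xs : List α) (s : PySem.Set α) (h : ∀ x ∈ xs, x ∈ s) : PySem.Set.update s xs = s := by
  induction xs generalizing s with
  | nil => exact PySem.Set.update_nil s
  | cons x xs ih =>
    rw [PySem.Set.update_cons]
    have hx : s.add x = s := by
      have hmem : x ∈ s := h x (by simp)
      simp [PySem.Set.add, hmem]
    rw [hx]
    exact ih s (fun y hy => h y (by simp [hy]))

-- the weighted-increment step A's loop reduces to
def pvW (d : PySem.Dict String Int) (p : String × Int) : PySem.Dict String Int :=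
  d.modify p.1 0 (· + p.2)

def pvWsum (ps : List (String × Int)) (k : String) : Int :=
  ((ps.filter (fun p => p.1 = k)).map (·.2)).sum

theorem pv_getD_foldl_W (ps : List (String × Int)) (d : PySem.Dict String Int) (k : String) :
    (ps.foldl pvW d).getD k 0 = d.getD k 0 + pvWsum ps k := by
  induction ps generalizing d with
  | nil => simp [pvWsum]
  | cons p ps ih =>
    simp only [List.foldl_cons, ih, pvW, PySem.Dict.getD_modify, pvWsum, List.filter_cons]
    by_cases h : p.1 = k
    · simp [h]; ring
    · have h' : ¬ (k = p.1) := fun he => h he.symm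
      simp [h, h']

theorem pv_keys_foldl_W (ps : List (String × Int)) (d : PySem.Dict String Int)
    (h : ∀ p ∈ ps, p.1 ∈ d.keys) : (ps.foldl pvW d).keys = d.keys := by
  have := PySem.Dict.keys_foldl_modify_key ps (fun p => p.1) 0 (fun _ p => (· + p.2)) d
  have he : (List.foldl (fun d x => d.modify x.1 0 ((fun _ p => (· + p.2)) d x)) d ps)
      = ps.foldl pvW d := rfl
  rw [he] at this
  rw [this]
  apply pv_set_update_of_subset
  intro x hx
  rcases List.mem_map.1 hx with ⟨p, hp, rfl⟩
  exact h p hp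

theorem pv_incA_eq_W (d : PySem.Dict String Int) (k : String) (h : k ∈ d.keys) :
    pvIncA d k = pvW d (k, 1) := by
  have hc : d.contains k = true := (pv_contains_iff_mem_keys d k).2 h
  have : ∃ v, d.get? k = some v := by
    rcases ho : d.get? k with _ | v
    · rw [PySem.Dict.get?_eq_none_iff_contains] at ho; rw [hc] at ho; cases ho
    · exact ⟨v, rfl⟩
  rcases this with ⟨v, hv⟩
  simp [pvIncA, hv, pvW, PySem.Dict.modify, PySem.Dict.getD_of_get?_eq_some _ _ hv]

theorem pv_foldl_incA_eq_W (xs : List Int) (d : PySem.Dict String Int)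
    (h : ∀ l ∈ xs, PySem.Int.toStr l ∈ d.keys) :
    xs.foldl (fun d l => pvIncA d (PySem.Int.toStr l)) d
      = (xs.map (fun l => (PySem.Int.toStr l, (1 : Int)))).foldl pvW d := by
  induction xs generalizing d with
  | nil => rfl
  | cons l xs ih =>
    simp only [List.foldl_cons, List.map_cons]
    rw [pv_incA_eq_W d _ (h l (by simp))]
    apply ih
    intro l' hl'
    have : (pvW d (PySem.Int.toStr l, 1)).keys = d.keys :=
      pv_keys_foldl_W [(PySem.Int.toStr l, 1)] d (by
        intro q hq; simp at hq; subst hq; exact h l (by simp))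
    rw [this]
    exact h l' (by simp [hl'])

-- ---- the base dict ----
def pvD0 : PySem.Dict String Int :=
  (PySem.List.pyRange 0 300 1).foldl (fun d i => d.insert (PySem.Int.toStr i) 0) PySem.Dict.empty

theorem pv_keys_nodup_300 : ((PySem.List.pyRange 0 300 1).map PySem.Int.toStr).Nodup := by
  apply List.Nodup.map_on
  · intro x hx y hy hxy
    rw [PySem.List.mem_pyRange_one] at hx hy
    exact pv_toStr_inj x y hx.1 (by omega) hy.1 (by omega) hxy
  · exact PySem.List.nodup_pyRange_one 0 300

theorem pv_keys_D0 : pvD0.keys = (PySem.List.pyRange 0 300 1).map PySem.Int.toStr := by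
  unfold pvD0
  have := PySem.Dict.keys_foldl_insert_key (PySem.List.pyRange 0 300 1)
    PySem.Int.toStr (fun _ _ => (0 : Int)) (PySem.Dict.empty : PySem.Dict String Int)
  have he : (List.foldl (fun d x => d.insert (PySem.Int.toStr x) ((fun _ _ => (0:Int)) d x))
      PySem.Dict.empty (PySem.List.pyRange 0 300 1))
      = (PySem.List.pyRange 0 300 1).foldl (fun d i => d.insert (PySem.Int.toStr i) 0)
        PySem.Dict.empty := rfl
  rw [he] at this
  rw [this, PySem.Dict.keys_empty, PySem.Set.update_nil_left]
  exact PySem.Set.ofList_eq_self_of_nodup _ pv_keys_nodup_300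

theorem pv_getD_D0_zero (k : String) : pvD0.getD k 0 = 0 := by
  unfold pvD0
  generalize PySem.List.pyRange 0 300 1 = l
  induction l using List.reverseRecOn with
  | nil => simp [PySem.Dict.getD_empty]
  | append_singleton l x ih =>
    rw [List.foldl_append, List.foldl_cons, List.foldl_nil, PySem.Dict.getD_insert]
    split <;> simp [ih]

-- ---- wsum / indicator arithmetic ----

theorem pv_wsum_map {β : Type} (xs : List β) (g : β → String) (w : β → Int) (k : String) :
    pvWsum (xs.map (fun x => (g x, w x))) k = ((xs.filter (fun x => g x = k)).map w).sum := by
  induction xs with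
  | nil => simp [pvWsum]
  | cons x xs ih =>
    simp only [List.map_cons, pvWsum, List.filter_cons] at *
    by_cases h : g x = k <;> simp [h, ih]

theorem pv_wsum_A (lengths : List Int) (m : Int) (hm : 0 ≤ m) (hm' : m < 300)
    (hl : ∀ l ∈ lengths, 0 ≤ l ∧ l < 300) :
    pvWsum (lengths.map (fun l => (PySem.Int.toStr l, (1 : Int)))) (PySem.Int.toStr m)
      = (lengths.count m : Int) := by
  rw [pv_wsum_map]
  have hf : lengths.filter (fun l => PySem.Int.toStr l = PySem.Int.toStr m)
      = lengths.filter (fun l => l = m) := by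
    apply List.filter_congr
    intro l hl'
    rcases hl l hl' with ⟨h0, h1⟩
    simp only [decide_eq_decide]
    exact ⟨fun h => pv_toStr_inj l m h0 (by omega) hm (by omega) h, fun h => by rw [h]⟩
  rw [hf]
  have hcnt : lengths.filter (fun l => l == m) = lengths.filter (fun l => l = m) := by
    apply List.filter_congr
    intro a _
    by_cases h : a = m <;> simp [h]
  rw [List.count_eq_length_filter, hcnt]
  generalize lengths.filter (fun l => l = m) = fl
  induction fl with
  | nil => simp
  | cons a l ih => simp only [List.map_cons, List.sum_cons, List.length_cons, ih]; push_cast; ring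

-- B's per-bucket indicator sum is the count of that length
theorem pv_sum_indicator (sessions : List (List Int)) (m : Int) :
    (sessions.map (fun s => if (s.length : Int) = m then (1 : Int) else 0)).sum
      = ((sessions.map (fun s => (s.length : Int))).count m : Int) := by
  induction sessions with
  | nil => simp
  | cons s rest ih =>
    simp only [List.map_cons, List.sum_cons, ih, List.count_cons]
    by_cases h : (s.length : Int) = m
    · simp [h]; ring
    · simp [h]

-- ===== VERDICT (by name: the statement is the Claim_ definition above) =====
theorem getLengthDist_spec : Claim_equal_getLengthDist := by
  intro us _ hpre
  unfold Spec_getLengthDist getLengthDist getLengthDist_alt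
  have hKeys : pvD0.keys = (PySem.List.pyRange 0 300 1).map PySem.Int.toStr := pv_keys_D0
  have hKnd : pvD0.keys.Nodup := by rw [hKeys]; exact pv_keys_nodup_300
  set sessions : List (List Int) := us.flatMap (fun lst => lst) with hsess
  set lengths : List Int := sessions.map (fun s => (s.length : Int)) with hlen
  have hbound : ∀ l ∈ lengths, 0 ≤ l ∧ l < 300 := by
    intro l hl
    rw [hlen, List.mem_map] at hl
    rcases hl with ⟨s, hs, rfl⟩
    rw [hsess, List.mem_flatMap] at hs
    rcases hs with ⟨lst, hlst, hs⟩
    simp only [Pre_getLengthDist, List.all_eq_true, decide_eq_true_eq] at hpre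
    have := hpre lst hlst s hs
    refine ⟨Int.natCast_nonneg _, by exact_mod_cast this⟩
  have hmemkey : ∀ l ∈ lengths, PySem.Int.toStr l ∈ pvD0.keys := by
    intro l hl
    rw [hKeys]
    exact List.mem_map.2 ⟨l, PySem.List.mem_pyRange_one.2 ⟨(hbound l hl).1, (hbound l hl).2⟩, rfl⟩
  -- A's dict as a pvW-fold over all session lengths
  have hA : us.foldl (fun d lst => lst.foldl (fun d session => pvIncA d (PySem.Int.toStr (session.length : Int))) d) pvD0
      = (lengths.map (fun l => (PySem.Int.toStr l, (1 : Int)))).foldl pvW pvD0 := by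
    have base : lengths.foldl (fun d l => pvIncA d (PySem.Int.toStr l)) pvD0
        = us.foldl (fun d lst => lst.foldl (fun d session => pvIncA d (PySem.Int.toStr (session.length : Int))) d) pvD0 := by
      rw [hlen, hsess, List.flatMap_def, List.map_flatten, List.foldl_flatten]
      simp only [List.foldl_map, List.map_map, Function.comp]
    rw [← base]
    exact pv_foldl_incA_eq_W lengths pvD0 hmemkey
  show (us.foldl (fun d lst => lst.foldl (fun d session => pvIncA d (PySem.Int.toStr (session.length : Int))) d) pvD0).items
      = (PySem.List.pyRange 0 300 1).map (fun i =>
          (PySem.Int.toStr i, (sessions.map (fun s => if (s.length : Int) = i then (1 : Int) else 0)).sum))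
  rw [hA]
  have hsubA : ∀ p ∈ lengths.map (fun l => (PySem.Int.toStr l, (1 : Int))), p.1 ∈ pvD0.keys := by
    intro p hp
    rcases List.mem_map.1 hp with ⟨l, hl, rfl⟩
    exact hmemkey l hl
  have hkA := pv_keys_foldl_W _ pvD0 hsubA
  rw [PySem.Dict.items_eq_map_keys _ (by rw [hkA]; exact hKnd) 0, hkA, hKeys, List.map_map]
  apply List.map_congr_left
  intro m hm
  have hm' := PySem.List.mem_pyRange_one.1 hm
  simp only [Function.comp, Prod.mk.injEq, true_and]
  rw [pv_getD_foldl_W, pv_getD_D0_zero,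
      pv_wsum_A lengths m hm'.1 hm'.2 hbound, pv_sum_indicator]
  simp [hlen]
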